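-- pv_equiv track=rewrite | github.com/Xzanam/advent_of_code_2025 | day3/batteries_output_joltage.py | get_largest_value_different
-- ===== SOURCE A (Python) =====
-- def get_largest_value_different(s: str) -> int:
--     n = len(s)
--     if n < 2:
--         return 0
--     # max_from_right[i] = max digit in s[i:]
--     max_from_right = [0] * n
--     cur = -1
--     for i in range(n - 1, -1, -1):
--         d = int(s[i])
--         if d > cur:
--             cur = d
--         max_from_right[i] = cur
--
--     best = 0
--     for i in range(n - 1):          # i can be tens digit, must have j > i
--         tens = int(s[i])
--         ones = max_from_right[i + 1]
--         best = max(best, tens * 10 + ones)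
--
--     return best
-- ===== SOURCE B (Python) =====
-- def get_largest_value_different(s: str) -> int:
--     if len(s) < 2:
--         return 0
--     best = 0
--     max_prev = int(s[0])
--     for ch in s[1:]:
--         d = int(ch)
--         best = max(best, max_prev * 10 + d)
--         max_prev = max(max_prev, d)
--     return best
-- ===== Notes on version B (the rewrite author's own statement) =====
-- stated objective: simpler
-- what changed: Replaces the precomputed suffix-max table and two loops with a single forward pass that keeps a running prefix-max scalar as the best tens digit seen so far.
import Mathlib
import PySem

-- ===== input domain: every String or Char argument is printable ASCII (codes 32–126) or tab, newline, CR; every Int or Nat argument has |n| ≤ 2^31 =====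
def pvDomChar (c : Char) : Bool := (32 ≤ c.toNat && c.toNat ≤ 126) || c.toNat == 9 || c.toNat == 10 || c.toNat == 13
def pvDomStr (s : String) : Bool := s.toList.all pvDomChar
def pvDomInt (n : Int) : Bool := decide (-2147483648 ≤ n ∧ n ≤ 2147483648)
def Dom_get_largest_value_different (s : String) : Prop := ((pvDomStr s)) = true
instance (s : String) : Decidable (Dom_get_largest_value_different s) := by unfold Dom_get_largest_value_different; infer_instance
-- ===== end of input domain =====

-- B replaces A's precomputed suffix-max table and two loops with one forward pass keeping a running prefix-max scalar.


-- ===== PORT A =====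
-- int(c) for a single character; exact on ASCII digit characters (all that Pre_ admits)
def pvDigit (c : Char) : Int := (c.toNat : Int) - 48

-- A's backward loop: returns (cur, max_from_right) after processing the given suffix
def pvBuildMfr : List Char → Int × List Int
  | [] => (-1, [])
  | c :: cs =>
    let r := pvBuildMfr cs
    let d := pvDigit c
    let cur' := if d > r.1 then d else r.1
    (cur', cur' :: r.2)

-- A's forward loop over i in range(n-1): tens = s[i], ones = max_from_right[i+1]
def pvLoopA : List Char → List Int → Int → Int
  | c :: cs, _ :: m1 :: ms, best => pvLoopA cs (m1 :: ms) (max best (pvDigit c * 10 + m1))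
  | _, _, best => best

def get_largest_value_different (s : String) : Int :=
  let l := s.toList
  if l.length < 2 then 0
  else pvLoopA l (pvBuildMfr l).2 0

-- ===== PORT B =====
-- B's single forward loop over s[1:], carrying (best, max_prev)
def pvLoopB : List Char → Int → Int → Int
  | [], best, _ => best
  | c :: cs, best, mp =>
    let d := pvDigit c
    pvLoopB cs (max best (mp * 10 + d)) (max mp d)

def get_largest_value_different_alt (s : String) : Int :=
  match s.toList with
  | [] => 0
  | [_] => 0
  | c :: cs => pvLoopB cs 0 (pvDigit c)

-- ===== PRECONDITION & SPEC =====
-- A raises ValueError at int(s[i]) when n ≥ 2 and some character is not a digit; Pre_ excludes exactly that.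
def Pre_get_largest_value_different (s : String) : Prop :=
  s.toList.length < 2 ∨ s.toList.all Char.isDigit = true
instance (s : String) : Decidable (Pre_get_largest_value_different s) := by
  unfold Pre_get_largest_value_different; infer_instance

def pvWitness_get_largest_value_different : String := "3972"

def Spec_get_largest_value_different (s : String) (out : Int) : Prop := out = get_largest_value_different_alt s
instance (s : String) (out : Int) : Decidable (Spec_get_largest_value_different s out) := by unfold Spec_get_largest_value_different; infer_instance

-- ===== CLAIM (what is proved, stated in full; the proofs are below) =====
def Claim_equal_get_largest_value_different : Prop := ∀ (s : String), Dom_get_largest_value_different s → Pre_get_largest_value_different s → Spec_get_largest_value_different s (get_largest_value_different s)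

-- ===== LEMMAS AND PROOFS =====

-- proof-side versions of the two loops over digit (Int) lists
def pvMxl : List Int → Int
  | [] => -1
  | d :: ds => max d (pvMxl ds)

def pvFA : List Int → Int → Int
  | d :: e :: ds, b => pvFA (e :: ds) (max b (d * 10 + pvMxl (e :: ds)))
  | _, b => b

def pvHB : List Int → Int → Int → Int
  | [], b, _ => b
  | d :: ds, b, m => pvHB ds (max b (m * 10 + d)) (max m d)

theorem pvBuildMfr_fst (l : List Char) : (pvBuildMfr l).1 = pvMxl (l.map pvDigit) := by
  induction l with
  | nil => rfl
  | cons c cs ih =>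
    simp [pvBuildMfr, pvMxl, ih]
    split <;> omega

theorem pvBuildMfr_snd_cons (c : Char) (cs : List Char) :
    (pvBuildMfr (c :: cs)).2 = (pvBuildMfr (c :: cs)).1 :: (pvBuildMfr cs).2 := rfl

theorem loopA_eq (l : List Char) : ∀ b, pvLoopA l (pvBuildMfr l).2 b = pvFA (l.map pvDigit) b := by
  induction l with
  | nil => intro b; rfl
  | cons c cs ih =>
    intro b
    cases cs with
    | nil => rfl
    | cons e es =>
      rw [pvBuildMfr_snd_cons, pvBuildMfr_snd_cons e es]
      show pvLoopA (e :: es) ((pvBuildMfr (e :: es)).1 :: (pvBuildMfr es).2) _ = _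
      rw [← pvBuildMfr_snd_cons e es, ih, pvBuildMfr_fst]
      rfl

theorem loopB_eq (cs : List Char) : ∀ b m, pvLoopB cs b m = pvHB (cs.map pvDigit) b m := by
  induction cs with
  | nil => intro b m; rfl
  | cons c cs ih => intro b m; simp only [pvLoopB, pvHB, List.map]; exact ih _ _

theorem hB_eq_fA (ds : List Int) : ∀ b m, (∀ d ∈ ds, 0 ≤ d) → pvHB ds b m = pvFA (m :: ds) b := by
  induction ds with
  | nil => intro b m _; rfl
  | cons e es ih =>
    intro b m hnn
    have he : (0:Int) ≤ e := hnn e (by simp)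
    have hes : ∀ d ∈ es, (0:Int) ≤ d := fun d hd => hnn d (by simp [hd])
    rw [show pvHB (e :: es) b m = pvHB es (max b (m * 10 + e)) (max m e) from rfl,
        ih _ _ hes]
    cases es with
    | nil =>
      simp only [pvFA, pvMxl]
      omega
    | cons x xs =>
      simp only [pvFA, pvMxl]
      congr 1
      omega

theorem digit_nonneg (c : Char) (h : c.isDigit = true) : 0 ≤ pvDigit c := by
  unfold Char.isDigit at h
  rw [Bool.and_eq_true, decide_eq_true_eq, decide_eq_true_eq] at h
  have h1 : '0'.val ≤ c.val := h.1
  rw [UInt32.le_iff_toNat_le] at h1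
  have h48 : (48 : Nat) ≤ c.toNat := h1
  simp only [pvDigit]
  omega

-- ===== VERDICT (by name: the statement is the Claim_ definition above) =====
theorem get_largest_value_different_spec : Claim_equal_get_largest_value_different := by
  intro s _ hpre
  unfold Spec_get_largest_value_different get_largest_value_different get_largest_value_different_alt
  cases hl : s.toList with
  | nil => simp
  | cons c cs =>
    cases cs with
    | nil => simp
    | cons e es =>
      have hlen : ¬ (c :: e :: es).length < 2 := by simp
      simp only [hlen, if_false]
      have hdig : ∀ x ∈ s.toList, x.isDigit = true := by
        rcases hpre with h | h
        · rw [hl] at h; simp at h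
        · exact List.all_eq_true.mp h
      rw [hl] at hdig
      have hnn : ∀ d ∈ (e :: es).map pvDigit, (0:Int) ≤ d := by
        intro d hd
        simp only [List.mem_map] at hd
        obtain ⟨x, hx, rfl⟩ := hd
        exact digit_nonneg x (hdig x (by simp [hx]))
      rw [loopA_eq, loopB_eq, hB_eq_fA _ _ _ hnn]
      rfl
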